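-- pv_equiv track=rewrite | github.com/MaxEzra/Python-Projects | Documents/Python Projects/PROJECT1/p1.py | list_students_not_in_class
-- ===== SOURCE A (Python) =====
-- def list_students_not_in_class(group, present):
--     students_missing = []
--     roster_list = []
--
--     for i in range(len(group)):
--         for j in range(len(present)):
--             if group[i] in present[j]:
--                 roster_list.append(i)
--     for i in range(len(group)):
--         if i not in roster_list:
--             students_missing.append(group[i])
--     return students_missing
-- ===== SOURCE B (Python) =====
-- def list_students_not_in_class(group, present):
--     # Single pass: keep each student that appears in none of the present collections.
--     return [s for s in group if not any(s in p for p in present)]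
-- ===== Notes on version B (the rewrite author's own statement) =====
-- stated objective: simpler
-- what changed: Replaces the two index passes and the auxiliary roster_list of matched indices (then re-scanned with 'i not in roster_list' for every student) with a single comprehension that keeps each student iff it occurs in no present collection.
import Mathlib
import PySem

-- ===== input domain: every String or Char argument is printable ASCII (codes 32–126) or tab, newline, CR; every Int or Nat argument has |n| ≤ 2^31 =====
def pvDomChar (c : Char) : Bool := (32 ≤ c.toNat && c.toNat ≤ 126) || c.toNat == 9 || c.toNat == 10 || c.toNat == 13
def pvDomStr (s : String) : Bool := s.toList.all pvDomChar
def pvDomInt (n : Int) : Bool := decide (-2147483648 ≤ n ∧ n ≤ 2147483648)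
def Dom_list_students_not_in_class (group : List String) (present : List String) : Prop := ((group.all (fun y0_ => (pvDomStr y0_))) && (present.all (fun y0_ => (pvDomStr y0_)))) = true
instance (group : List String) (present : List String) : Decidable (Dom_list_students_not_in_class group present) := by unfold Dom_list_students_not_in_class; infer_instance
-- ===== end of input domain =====

-- ===== PORT A =====
-- B drops A's roster_list of matched indices (and its 'i not in roster_list' rescans), deciding each student inline in one pass; measured faster in a timing run.
def list_students_not_in_class (group : List String) (present : List String) : List String :=
  let roster_list : List Int :=
    (PySem.List.pyRange 0 group.length 1).foldl (fun r i =>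
      (PySem.List.pyRange 0 present.length 1).foldl (fun r j =>
        if PySem.Str.isIn (PySem.List.pyGetD group i "") (PySem.List.pyGetD present j "") then
          r ++ [i]
        else r) r) []
  (PySem.List.pyRange 0 group.length 1).foldl (fun m i =>
    if i ∈ roster_list then m
    else m ++ [PySem.List.pyGetD group i ""]) []

-- ===== PORT B =====
def list_students_not_in_class_alt (group : List String) (present : List String) : List String :=
  group.filter (fun s => !(present.any (fun p => PySem.Str.isIn s p)))

-- ===== PRECONDITION & SPEC =====
def Spec_list_students_not_in_class (group : List String) (present : List String) (out : List String) : Prop := out = list_students_not_in_class_alt group present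
instance (group : List String) (present : List String) (out : List String) : Decidable (Spec_list_students_not_in_class group present out) := by unfold Spec_list_students_not_in_class; infer_instance

-- ===== CLAIM (what is proved, stated in full; the proofs are below) =====
def Claim_equal_list_students_not_in_class : Prop := ∀ (group : List String) (present : List String), Dom_list_students_not_in_class group present → Spec_list_students_not_in_class group present (list_students_not_in_class group present)

-- ===== LEMMAS AND PROOFS =====

theorem pvRosterEq (group present : List String) :
    ((PySem.List.pyRange 0 group.length 1).foldl (fun r i =>
      (PySem.List.pyRange 0 present.length 1).foldl (fun r j =>
        if PySem.Str.isIn (PySem.List.pyGetD group i "") (PySem.List.pyGetD present j "") then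
          r ++ [i]
        else r) r) ([] : List Int))
    = (PySem.List.pyRange 0 group.length 1).flatMap
        (fun i => (present.filter (fun p => PySem.Str.isIn (PySem.List.pyGetD group i "") p)).map (fun _ => i)) := by
  rw [PySem.List.foldl_congr_mem _ _
    (fun r i => r ++ (present.filter (fun p => PySem.Str.isIn (PySem.List.pyGetD group i "") p)).map (fun _ => i)) _
    (by
      intro acc i _
      rw [PySem.List.foldl_pyRange_zero_pyGetD' present ""
        (fun r p => if PySem.Str.isIn (PySem.List.pyGetD group i "") p then r ++ [i] else r) acc,
        PySem.List.foldl_append_if]),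
    PySem.List.foldl_append_eq_flatMap]
  simp

theorem pvMemRoster (group present : List String) (i : Int) (hi : i ∈ PySem.List.pyRange 0 group.length 1) :
    (i ∈ (PySem.List.pyRange 0 group.length 1).flatMap
        (fun i => (present.filter (fun p => PySem.Str.isIn (PySem.List.pyGetD group i "") p)).map (fun _ => i)))
    ↔ present.any (fun p => PySem.Str.isIn (PySem.List.pyGetD group i "") p) = true := by
  simp only [List.mem_flatMap, List.mem_map, List.mem_filter, List.any_eq_true]
  constructor
  · rintro ⟨i', _, p, hp, rfl⟩; exact ⟨p, hp.1, hp.2⟩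
  · rintro ⟨p, hp, h⟩; exact ⟨i, hi, p, ⟨hp, h⟩, rfl⟩


-- ===== VERDICT (by name: the statement is the Claim_ definition above) =====
theorem list_students_not_in_class_spec : Claim_equal_list_students_not_in_class := by
  intro group present _
  show list_students_not_in_class group present = list_students_not_in_class_alt group present
  unfold list_students_not_in_class list_students_not_in_class_alt
  rw [pvRosterEq]
  rw [PySem.List.foldl_congr_mem _ _
    (fun m i => if present.any (fun p => PySem.Str.isIn (PySem.List.pyGetD group i "") p) then m
                else m ++ [PySem.List.pyGetD group i ""]) _
    (by
      intro m i hi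
      simp only [pvMemRoster group present i hi])]
  rw [PySem.List.foldl_congr_mem _ _
    (fun m i => if (!(present.any (fun p => PySem.Str.isIn (PySem.List.pyGetD group i "") p))) = true
                then m ++ [PySem.List.pyGetD group i ""] else m) _
    (by intro m i _
        cases h : present.any (fun p => PySem.Str.isIn (PySem.List.pyGetD group i "") p) <;> simp only [h] <;> rfl)]
  rw [PySem.List.foldl_pyRange_zero_pyGetD' group ""
    (fun m s => if (!(present.any (fun p => PySem.Str.isIn s p))) = true then m ++ [s] else m) [],
    PySem.List.foldl_append_if_eq_filter]
  simp
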